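-- pv_equiv track=rewrite | github.com/seoul-ssafy-class-2-studyclub/Eunsung | Line/yogiyo1.py | solution
-- ===== SOURCE A (Python) =====
-- def solution(A, B, C, D):
--     numbers = [A, B, C, D]
--     results = set()
--     visited = [False] * 4
--     def permu(now, arr):
--         if len(arr) == 4:
--             result = 1000 * arr[0] + 100 * arr[1] + 10 * arr[2] + arr[3]
--
--             if 0 <= result < 2000:
--                 if arr[2] <= 6:
--                     results.add(result)
--
--             elif result <= 3000:
--                 if arr[1] < 4 and arr[2] <= 6:
--                     results.add(result)
--
--         for nxt in range(4):
--             if visited[nxt]: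
--                 continue
--             visited[nxt] = True
--             permu(nxt, arr + [numbers[nxt]])
--             visited[nxt] = False
--
--     for i in range(4):
--         visited[i] = True
--         permu(i, [numbers[i]])
--         visited[i] = False
--
--     return len(results)
-- ===== SOURCE B (Python) =====
-- def solution(A, B, C, D):
--     nums = [A, B, C, D]
--     seen = set()
--     for i in range(4):
--         for j in range(4):
--             if j == i:
--                 continue
--             for k in range(4):
--                 if k == i or k == j:
--                     continue
--                 l = 6 - i - j - k  # the one remaining index, by arithmetic complement
--                 r = 1000 * nums[i] + 100 * nums[j] + 10 * nums[k] + nums[l]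
--                 if 0 <= r < 2000:
--                     if nums[k] <= 6:
--                         seen.add(r)
--                 elif r <= 3000:
--                     if nums[j] < 4 and nums[k] <= 6:
--                         seen.add(r)
--     return len(seen)
-- ===== Notes on version B (the rewrite author's own statement) =====
-- stated objective: simpler
-- what changed: Replaced the recursive permu/visited backtracking (closure mutating a shared visited array and results set) with three flat nested index loops whose fourth index is obtained by the arithmetic complement 6-i-j-k, keeping the original validity conditions verbatim.
import Mathlib
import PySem

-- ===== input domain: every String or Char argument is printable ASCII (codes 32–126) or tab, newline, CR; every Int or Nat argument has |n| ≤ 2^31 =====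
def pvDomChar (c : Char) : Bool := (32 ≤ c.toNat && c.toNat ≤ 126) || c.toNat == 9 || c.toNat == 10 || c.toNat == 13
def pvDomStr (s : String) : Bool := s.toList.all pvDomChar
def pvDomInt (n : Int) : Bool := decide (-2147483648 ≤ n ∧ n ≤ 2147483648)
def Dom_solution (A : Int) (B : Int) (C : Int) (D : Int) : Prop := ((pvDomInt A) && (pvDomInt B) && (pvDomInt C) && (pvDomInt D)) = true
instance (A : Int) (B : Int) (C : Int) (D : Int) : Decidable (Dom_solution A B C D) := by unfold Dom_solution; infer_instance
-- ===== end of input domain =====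

-- B replaces A's recursive visited-array backtracking by three nested index loops with an
-- arithmetic complement for the last index (objective: simpler).

-- ===== PORT A =====
-- recursive permu; fuel is a totality guard only: recursion depth is bounded by 4
-- (once arr has 4 elements every index is visited and the loop body recurses nowhere),
-- so with initial fuel 4 the fuel-0 branch is never reached.
-- arr indexing uses pyGetD _ _ 0: exact, since arr[0..3] is only read when len(arr) == 4.
def solutionPermu (numbers : List Int) : Nat → List Bool → List Int → PySem.Set Int → PySem.Set Int
  | 0, _, _, results => results
  | fuel + 1, visited, arr, results =>
    let results :=
      if arr.length == 4 then
        let result := 1000 * PySem.List.pyGetD arr 0 0 + 100 * PySem.List.pyGetD arr 1 0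
            + 10 * PySem.List.pyGetD arr 2 0 + PySem.List.pyGetD arr 3 0
        if 0 ≤ result ∧ result < 2000 then
          if PySem.List.pyGetD arr 2 0 ≤ 6 then PySem.Set.add results result else results
        else if result ≤ 3000 then
          if PySem.List.pyGetD arr 1 0 < 4 ∧ PySem.List.pyGetD arr 2 0 ≤ 6 then
            PySem.Set.add results result
          else results
        else results
      else results
    (PySem.List.pyRange 0 4 1).foldl (fun res nxt =>
      if PySem.List.pyGetD visited nxt false then res
      else solutionPermu numbers fuel (PySem.List.pySetD visited nxt true)
             (arr ++ [PySem.List.pyGetD numbers nxt 0]) res) results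

def solution (A : Int) (B : Int) (C : Int) (D : Int) : Int :=
  let numbers : List Int := [A, B, C, D]
  let visited : List Bool := List.replicate 4 false
  let results : PySem.Set Int :=
    (PySem.List.pyRange 0 4 1).foldl (fun res i =>
      solutionPermu numbers 4 (PySem.List.pySetD visited i true)
        [PySem.List.pyGetD numbers i 0] res) PySem.Set.empty
  PySem.Set.len results

-- ===== PORT B =====
-- each Python for-loop becomes a foldl whose body is a named helper (innermost loop first)
def altInner (nums : List Int) (i : Int) (j : Int) (s : PySem.Set Int) : PySem.Set Int :=
  (PySem.List.pyRange 0 4 1).foldl (fun s k =>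
    if k == i || k == j then s
    else
      let l : Int := 6 - i - j - k
      let r := 1000 * PySem.List.pyGetD nums i 0 + 100 * PySem.List.pyGetD nums j 0
          + 10 * PySem.List.pyGetD nums k 0 + PySem.List.pyGetD nums l 0
      if 0 ≤ r ∧ r < 2000 then
        if PySem.List.pyGetD nums k 0 ≤ 6 then PySem.Set.add s r else s
      else if r ≤ 3000 then
        if PySem.List.pyGetD nums j 0 < 4 ∧ PySem.List.pyGetD nums k 0 ≤ 6 then
          PySem.Set.add s r
        else s
      else s) s

def altMiddle (nums : List Int) (i : Int) (s : PySem.Set Int) : PySem.Set Int :=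
  (PySem.List.pyRange 0 4 1).foldl (fun s j => if j == i then s else altInner nums i j s) s

def solution_alt (A : Int) (B : Int) (C : Int) (D : Int) : Int :=
  let nums : List Int := [A, B, C, D]
  let seen : PySem.Set Int :=
    (PySem.List.pyRange 0 4 1).foldl (fun s i => altMiddle nums i s) PySem.Set.empty
  PySem.Set.len seen

-- ===== PRECONDITION & SPEC =====
def Spec_solution (A : Int) (B : Int) (C : Int) (D : Int) (out : Int) : Prop := out = solution_alt A B C D
instance (A : Int) (B : Int) (C : Int) (D : Int) (out : Int) : Decidable (Spec_solution A B C D out) := by unfold Spec_solution; infer_instance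

-- ===== CLAIM (what is proved, stated in full; the proofs are below) =====
def Claim_equal_solution : Prop := ∀ (A : Int) (B : Int) (C : Int) (D : Int), Dom_solution A B C D → Spec_solution A B C D (solution A B C D)

-- ===== LEMMAS AND PROOFS =====
-- the 24 permutations are enumerated by both programs in the same lexicographic index
-- order; chk is the shared shape of one validity-check-and-add step
def chk (a b c d : Int) (s : PySem.Set Int) : PySem.Set Int :=
  let r := 1000 * a + 100 * b + 10 * c + d
  if 0 ≤ r ∧ r < 2000 then
    if c ≤ 6 then PySem.Set.add s r else s
  else if r ≤ 3000 then
    if b < 4 ∧ c ≤ 6 then PySem.Set.add s r else s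
  else s

theorem hr4 : PySem.List.pyRange 0 4 1 = [0, 1, 2, 3] := by decide

theorem permu3_0 (a b c d : Int) (x y z : Int) (res : PySem.Set Int) :
    solutionPermu [a, b, c, d] 2 [false, true, true, true] [x, y, z] res
      = chk x y z a res := by
  simp [solutionPermu, chk, PySem.List.pyGetD, PySem.List.pyGet?, PySem.List.pyIdx?, hr4,
    PySem.List.pySetD, PySem.List.pySet?]

theorem permu3_1 (a b c d : Int) (x y z : Int) (res : PySem.Set Int) :
    solutionPermu [a, b, c, d] 2 [true, false, true, true] [x, y, z] res
      = chk x y z b res := by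
  simp [solutionPermu, chk, PySem.List.pyGetD, PySem.List.pyGet?, PySem.List.pyIdx?, hr4,
    PySem.List.pySetD, PySem.List.pySet?]

theorem permu3_2 (a b c d : Int) (x y z : Int) (res : PySem.Set Int) :
    solutionPermu [a, b, c, d] 2 [true, true, false, true] [x, y, z] res
      = chk x y z c res := by
  simp [solutionPermu, chk, PySem.List.pyGetD, PySem.List.pyGet?, PySem.List.pyIdx?, hr4,
    PySem.List.pySetD, PySem.List.pySet?]

theorem permu3_3 (a b c d : Int) (x y z : Int) (res : PySem.Set Int) :
    solutionPermu [a, b, c, d] 2 [true, true, true, false] [x, y, z] res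
      = chk x y z d res := by
  simp [solutionPermu, chk, PySem.List.pyGetD, PySem.List.pyGet?, PySem.List.pyIdx?, hr4,
    PySem.List.pySetD, PySem.List.pySet?]

theorem permu2_01 (a b c d : Int) (x y : Int) (res : PySem.Set Int) :
    solutionPermu [a, b, c, d] 3 [false, false, true, true] [x, y] res
      = chk x y b a (chk x y a b res) := by
  rw [solutionPermu]
  simp only [hr4, List.foldl]
  simp [PySem.List.pyGetD, PySem.List.pyGet?, PySem.List.pyIdx?,
    PySem.List.pySetD, PySem.List.pySet?, List.set, permu3_0, permu3_1]

theorem permu2_02 (a b c d : Int) (x y : Int) (res : PySem.Set Int) :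
    solutionPermu [a, b, c, d] 3 [false, true, false, true] [x, y] res
      = chk x y c a (chk x y a c res) := by
  rw [solutionPermu]
  simp only [hr4, List.foldl]
  simp [PySem.List.pyGetD, PySem.List.pyGet?, PySem.List.pyIdx?,
    PySem.List.pySetD, PySem.List.pySet?, List.set, permu3_0, permu3_2]

theorem permu2_03 (a b c d : Int) (x y : Int) (res : PySem.Set Int) :
    solutionPermu [a, b, c, d] 3 [false, true, true, false] [x, y] res
      = chk x y d a (chk x y a d res) := by
  rw [solutionPermu]
  simp only [hr4, List.foldl]
  simp [PySem.List.pyGetD, PySem.List.pyGet?, PySem.List.pyIdx?,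
    PySem.List.pySetD, PySem.List.pySet?, List.set, permu3_0, permu3_3]

theorem permu2_12 (a b c d : Int) (x y : Int) (res : PySem.Set Int) :
    solutionPermu [a, b, c, d] 3 [true, false, false, true] [x, y] res
      = chk x y c b (chk x y b c res) := by
  rw [solutionPermu]
  simp only [hr4, List.foldl]
  simp [PySem.List.pyGetD, PySem.List.pyGet?, PySem.List.pyIdx?,
    PySem.List.pySetD, PySem.List.pySet?, List.set, permu3_1, permu3_2]

theorem permu2_13 (a b c d : Int) (x y : Int) (res : PySem.Set Int) :
    solutionPermu [a, b, c, d] 3 [true, false, true, false] [x, y] res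
      = chk x y d b (chk x y b d res) := by
  rw [solutionPermu]
  simp only [hr4, List.foldl]
  simp [PySem.List.pyGetD, PySem.List.pyGet?, PySem.List.pyIdx?,
    PySem.List.pySetD, PySem.List.pySet?, List.set, permu3_1, permu3_3]

theorem permu2_23 (a b c d : Int) (x y : Int) (res : PySem.Set Int) :
    solutionPermu [a, b, c, d] 3 [true, true, false, false] [x, y] res
      = chk x y d c (chk x y c d res) := by
  rw [solutionPermu]
  simp only [hr4, List.foldl]
  simp [PySem.List.pyGetD, PySem.List.pyGet?, PySem.List.pyIdx?,
    PySem.List.pySetD, PySem.List.pySet?, List.set, permu3_2, permu3_3]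

theorem permu1_0 (a b c d : Int) (res : PySem.Set Int) :
    solutionPermu [a, b, c, d] 4 [true, false, false, false] [a] res
      = (chk a d c b (chk a d b c (chk a c d b (chk a c b d (chk a b d c (chk a b c d res)))))) := by
  rw [solutionPermu]
  simp only [hr4, List.foldl]
  simp [PySem.List.pyGetD, PySem.List.pyGet?, PySem.List.pyIdx?,
    PySem.List.pySetD, PySem.List.pySet?, List.set, permu2_12, permu2_13, permu2_23]

theorem permu1_1 (a b c d : Int) (res : PySem.Set Int) :
    solutionPermu [a, b, c, d] 4 [false, true, false, false] [b] res
      = (chk b d c a (chk b d a c (chk b c d a (chk b c a d (chk b a d c (chk b a c d res)))))) := by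
  rw [solutionPermu]
  simp only [hr4, List.foldl]
  simp [PySem.List.pyGetD, PySem.List.pyGet?, PySem.List.pyIdx?,
    PySem.List.pySetD, PySem.List.pySet?, List.set, permu2_02, permu2_03, permu2_23]

theorem permu1_2 (a b c d : Int) (res : PySem.Set Int) :
    solutionPermu [a, b, c, d] 4 [false, false, true, false] [c] res
      = (chk c d b a (chk c d a b (chk c b d a (chk c b a d (chk c a d b (chk c a b d res)))))) := by
  rw [solutionPermu]
  simp only [hr4, List.foldl]
  simp [PySem.List.pyGetD, PySem.List.pyGet?, PySem.List.pyIdx?,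
    PySem.List.pySetD, PySem.List.pySet?, List.set, permu2_01, permu2_03, permu2_13]

theorem permu1_3 (a b c d : Int) (res : PySem.Set Int) :
    solutionPermu [a, b, c, d] 4 [false, false, false, true] [d] res
      = (chk d c b a (chk d c a b (chk d b c a (chk d b a c (chk d a c b (chk d a b c res)))))) := by
  rw [solutionPermu]
  simp only [hr4, List.foldl]
  simp [PySem.List.pyGetD, PySem.List.pyGet?, PySem.List.pyIdx?,
    PySem.List.pySetD, PySem.List.pySet?, List.set, permu2_01, permu2_02, permu2_12]

theorem solA (a b c d : Int) :
    solution a b c d = PySem.Set.len (chk d c b a (chk d c a b (chk d b c a (chk d b a c (chk d a c b (chk d a b c (chk c d b a (chk c d a b (chk c b d a (chk c b a d (chk c a d b (chk c a b d (chk b d c a (chk b d a c (chk b c d a (chk b c a d (chk b a d c (chk b a c d (chk a d c b (chk a d b c (chk a c d b (chk a c b d (chk a b d c (chk a b c d PySem.Set.empty)))))))))))))))))))))))) := by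
  unfold solution
  simp only [hr4, List.foldl]
  simp [PySem.List.pyGetD, PySem.List.pyGet?, PySem.List.pyIdx?,
    PySem.List.pySetD, PySem.List.pySet?, List.set, permu1_0, permu1_1, permu1_2, permu1_3]

theorem altInner_01 (a b c d : Int) (s : PySem.Set Int) :
    altInner [a, b, c, d] 0 1 s
      = (chk a b d c (chk a b c d s)) := by
  simp [altInner, chk, hr4, PySem.List.pyGetD, PySem.List.pyGet?, PySem.List.pyIdx?]

theorem altInner_02 (a b c d : Int) (s : PySem.Set Int) :
    altInner [a, b, c, d] 0 2 s
      = (chk a c d b (chk a c b d s)) := by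
  simp [altInner, chk, hr4, PySem.List.pyGetD, PySem.List.pyGet?, PySem.List.pyIdx?]

theorem altInner_03 (a b c d : Int) (s : PySem.Set Int) :
    altInner [a, b, c, d] 0 3 s
      = (chk a d c b (chk a d b c s)) := by
  simp [altInner, chk, hr4, PySem.List.pyGetD, PySem.List.pyGet?, PySem.List.pyIdx?]

theorem altInner_10 (a b c d : Int) (s : PySem.Set Int) :
    altInner [a, b, c, d] 1 0 s
      = (chk b a d c (chk b a c d s)) := by
  simp [altInner, chk, hr4, PySem.List.pyGetD, PySem.List.pyGet?, PySem.List.pyIdx?]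

theorem altInner_12 (a b c d : Int) (s : PySem.Set Int) :
    altInner [a, b, c, d] 1 2 s
      = (chk b c d a (chk b c a d s)) := by
  simp [altInner, chk, hr4, PySem.List.pyGetD, PySem.List.pyGet?, PySem.List.pyIdx?]

theorem altInner_13 (a b c d : Int) (s : PySem.Set Int) :
    altInner [a, b, c, d] 1 3 s
      = (chk b d c a (chk b d a c s)) := by
  simp [altInner, chk, hr4, PySem.List.pyGetD, PySem.List.pyGet?, PySem.List.pyIdx?]

theorem altInner_20 (a b c d : Int) (s : PySem.Set Int) :
    altInner [a, b, c, d] 2 0 s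
      = (chk c a d b (chk c a b d s)) := by
  simp [altInner, chk, hr4, PySem.List.pyGetD, PySem.List.pyGet?, PySem.List.pyIdx?]

theorem altInner_21 (a b c d : Int) (s : PySem.Set Int) :
    altInner [a, b, c, d] 2 1 s
      = (chk c b d a (chk c b a d s)) := by
  simp [altInner, chk, hr4, PySem.List.pyGetD, PySem.List.pyGet?, PySem.List.pyIdx?]

theorem altInner_23 (a b c d : Int) (s : PySem.Set Int) :
    altInner [a, b, c, d] 2 3 s
      = (chk c d b a (chk c d a b s)) := by
  simp [altInner, chk, hr4, PySem.List.pyGetD, PySem.List.pyGet?, PySem.List.pyIdx?]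

theorem altInner_30 (a b c d : Int) (s : PySem.Set Int) :
    altInner [a, b, c, d] 3 0 s
      = (chk d a c b (chk d a b c s)) := by
  simp [altInner, chk, hr4, PySem.List.pyGetD, PySem.List.pyGet?, PySem.List.pyIdx?]

theorem altInner_31 (a b c d : Int) (s : PySem.Set Int) :
    altInner [a, b, c, d] 3 1 s
      = (chk d b c a (chk d b a c s)) := by
  simp [altInner, chk, hr4, PySem.List.pyGetD, PySem.List.pyGet?, PySem.List.pyIdx?]

theorem altInner_32 (a b c d : Int) (s : PySem.Set Int) :
    altInner [a, b, c, d] 3 2 s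
      = (chk d c b a (chk d c a b s)) := by
  simp [altInner, chk, hr4, PySem.List.pyGetD, PySem.List.pyGet?, PySem.List.pyIdx?]

theorem altMiddle_0 (a b c d : Int) (s : PySem.Set Int) :
    altMiddle [a, b, c, d] 0 s
      = (chk a d c b (chk a d b c (chk a c d b (chk a c b d (chk a b d c (chk a b c d s)))))) := by
  simp only [altMiddle, hr4, List.foldl]
  simp [altInner_01, altInner_02, altInner_03]

theorem altMiddle_1 (a b c d : Int) (s : PySem.Set Int) :
    altMiddle [a, b, c, d] 1 s
      = (chk b d c a (chk b d a c (chk b c d a (chk b c a d (chk b a d c (chk b a c d s)))))) := by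
  simp only [altMiddle, hr4, List.foldl]
  simp [altInner_10, altInner_12, altInner_13]

theorem altMiddle_2 (a b c d : Int) (s : PySem.Set Int) :
    altMiddle [a, b, c, d] 2 s
      = (chk c d b a (chk c d a b (chk c b d a (chk c b a d (chk c a d b (chk c a b d s)))))) := by
  simp only [altMiddle, hr4, List.foldl]
  simp [altInner_20, altInner_21, altInner_23]

theorem altMiddle_3 (a b c d : Int) (s : PySem.Set Int) :
    altMiddle [a, b, c, d] 3 s
      = (chk d c b a (chk d c a b (chk d b c a (chk d b a c (chk d a c b (chk d a b c s)))))) := by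
  simp only [altMiddle, hr4, List.foldl]
  simp [altInner_30, altInner_31, altInner_32]

theorem solB (a b c d : Int) :
    solution_alt a b c d = PySem.Set.len (chk d c b a (chk d c a b (chk d b c a (chk d b a c (chk d a c b (chk d a b c (chk c d b a (chk c d a b (chk c b d a (chk c b a d (chk c a d b (chk c a b d (chk b d c a (chk b d a c (chk b c d a (chk b c a d (chk b a d c (chk b a c d (chk a d c b (chk a d b c (chk a c d b (chk a c b d (chk a b d c (chk a b c d PySem.Set.empty)))))))))))))))))))))))) := by
  unfold solution_alt
  simp only [hr4, List.foldl]
  simp [altMiddle_0, altMiddle_1, altMiddle_2, altMiddle_3]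

-- ===== VERDICT (by name: the statement is the Claim_ definition above) =====
theorem solution_spec : Claim_equal_solution := by
  intro A B C D _
  unfold Spec_solution
  rw [solA, solB]
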